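-- pv_equiv track=rewrite | github.com/rabisnath/CAAP-CS | Lab4/main.py | make_diag_grid
-- ===== SOURCE A (Python) =====
-- def make_diag_grid(size, num_colors):
-- 	grid = []
-- 	icount = 0
-- 	for i in range(size):
-- 		row = []
-- 		jcount = icount % num_colors
-- 		for j in range(size):
-- 			row.append(jcount % num_colors)
-- 			jcount+=1
-- 		grid.append(row)
-- 		icount+=1
-- 	return grid
-- ===== SOURCE B (Python) =====
-- def make_diag_grid(size, num_colors):
-- 	base = [k % num_colors for k in range(2*size - 1)]
-- 	return [base[i:i+size] for i in range(size)]
-- ===== Notes on version B (the rewrite author's own statement) =====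
-- stated objective: alternative
-- what changed: B builds one shared periodic base array [k % num_colors for k in range(2*size-1)] in a single linear pass and forms each row as a length-size slice base[i:i+size], replacing A's nested per-cell counter loops.
import Mathlib
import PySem

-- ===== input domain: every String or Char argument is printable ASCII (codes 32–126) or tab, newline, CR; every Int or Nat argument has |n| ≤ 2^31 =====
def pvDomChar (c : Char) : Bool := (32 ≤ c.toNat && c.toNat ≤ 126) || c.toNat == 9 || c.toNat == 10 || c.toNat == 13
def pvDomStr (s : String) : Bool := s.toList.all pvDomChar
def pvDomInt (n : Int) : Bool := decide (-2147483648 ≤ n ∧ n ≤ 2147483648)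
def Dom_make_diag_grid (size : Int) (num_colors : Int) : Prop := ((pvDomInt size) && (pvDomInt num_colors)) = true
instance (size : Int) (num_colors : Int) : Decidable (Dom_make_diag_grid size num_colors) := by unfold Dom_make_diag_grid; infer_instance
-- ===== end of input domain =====

-- B builds one shared periodic base list and takes a length-size slice per row, instead of A's nested counter loops (objective: alternative).

-- ===== PORT A =====
-- A: nested loops with running counters icount/jcount, appending cell by cell.
def make_diag_grid (size : Int) (num_colors : Int) : List (List Int) :=
  let st :=
    (PySem.List.pyRange 0 size).foldl
      (fun (st : List (List Int) × Int) _ =>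
        let inner :=
          (PySem.List.pyRange 0 size).foldl
            (fun (rj : List Int × Int) _ => (rj.1 ++ [PySem.Int.mod rj.2 num_colors], rj.2 + 1))
            ([], PySem.Int.mod st.2 num_colors)
        (st.1 ++ [inner.1], st.2 + 1))
      ([], 0)
  st.1

-- ===== PORT B =====
-- B: base = [k % num_colors for k in range(2*size-1)]; grid = [base[i:i+size] for i in range(size)]
def make_diag_grid_alt (size : Int) (num_colors : Int) : List (List Int) :=
  let base := (PySem.List.pyRange 0 (2 * size - 1)).map (fun k => PySem.Int.mod k num_colors)
  (PySem.List.pyRange 0 size).map (fun i => PySem.List.slice base (some i) (some (i + size)))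

-- ===== PRECONDITION & SPEC =====
-- Pre_ excludes exactly the inputs where Python A raises ZeroDivisionError: num_colors == 0 with size > 0 (B raises there too).
def Pre_make_diag_grid (size : Int) (num_colors : Int) : Prop := size ≤ 0 ∨ num_colors ≠ 0
instance (size : Int) (num_colors : Int) : Decidable (Pre_make_diag_grid size num_colors) := by unfold Pre_make_diag_grid; infer_instance
def pvWitness_make_diag_grid : Int × Int := (3, 2)

def Spec_make_diag_grid (size : Int) (num_colors : Int) (out : List (List Int)) : Prop := out = make_diag_grid_alt size num_colors
instance (size : Int) (num_colors : Int) (out : List (List Int)) : Decidable (Spec_make_diag_grid size num_colors out) := by unfold Spec_make_diag_grid; infer_instance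

-- ===== CLAIM (what is proved, stated in full; the proofs are below) =====
def Claim_equal_make_diag_grid : Prop := ∀ (size : Int) (num_colors : Int), Dom_make_diag_grid size num_colors → Pre_make_diag_grid size num_colors → Spec_make_diag_grid size num_colors (make_diag_grid size num_colors)

-- ===== LEMMAS AND PROOFS =====

lemma fmod_add_fmod (a c b : Int) : (Int.fmod a b + c).fmod b = (a + c).fmod b := by
  rw [show Int.fmod a b + c = (a + c) + b * (-(a.fdiv b)) by rw [Int.fmod_def]; ring,
    Int.add_mul_fmod_self_left]

lemma innerA_eq (nc : Int) (l : List Int) (acc : List Int) (c : Int) :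
    l.foldl (fun (rj : List Int × Int) _ => (rj.1 ++ [PySem.Int.mod rj.2 nc], rj.2 + 1)) (acc, c)
      = (acc ++ (List.range l.length).map (fun (j : Nat) => Int.fmod (c + (j : Int)) nc), c + l.length) := by
  induction l generalizing acc c with
  | nil => simp
  | cons x l ih =>
    simp only [List.foldl_cons, ih, List.length_cons, List.range_succ_eq_map, List.map_cons,
      List.map_map]
    refine Prod.ext ?_ (by push_cast; ring)
    simp only [List.append_assoc, List.cons_append, List.nil_append, Nat.cast_zero, add_zero]
    rw [show PySem.Int.mod c nc = c.fmod nc from rfl]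
    refine congrArg (fun t => acc ++ c.fmod nc :: t) ?_
    apply List.map_congr_left
    intro a _
    simp only [Function.comp_apply]
    congr 1
    push_cast
    ring

lemma outerA_eq (size nc : Int) (l : List Int) (acc : List (List Int)) (c : Int) :
    l.foldl
      (fun (st : List (List Int) × Int) _ =>
        let inner :=
          (PySem.List.pyRange 0 size).foldl
            (fun (rj : List Int × Int) _ => (rj.1 ++ [PySem.Int.mod rj.2 nc], rj.2 + 1))
            ([], PySem.Int.mod st.2 nc)
        (st.1 ++ [inner.1], st.2 + 1)) (acc, c)
      = (acc ++ (List.range l.length).map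
          (fun (i : Nat) => (List.range (PySem.List.pyRange 0 size).length).map
            (fun (j : Nat) => Int.fmod (c + (i : Int) + (j : Int)) nc)), c + l.length) := by
  induction l generalizing acc c with
  | nil => simp
  | cons x l ih =>
    simp only [List.foldl_cons]
    rw [ih]
    simp only [innerA_eq, List.nil_append, List.length_cons, List.range_succ_eq_map,
      List.map_cons, List.map_map, Nat.cast_zero, add_zero]
    refine Prod.ext ?_ (by push_cast; ring)
    simp only [List.append_assoc, List.cons_append, List.append_right_inj, List.cons.injEq]
    refine ⟨?_, ?_⟩
    · apply List.map_congr_left; intro j _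
      rw [show PySem.Int.mod c nc = c.fmod nc from rfl, fmod_add_fmod]
    · apply List.map_congr_left; intro a _
      simp only [Function.comp_apply]
      apply List.map_congr_left; intro j _
      congr 1
      push_cast
      ring

lemma window_map_range (f : Nat → Int) (m n i : Nat) (h : i + n ≤ m) :
    List.take n (List.drop i ((List.range m).map f)) = (List.range n).map (fun j => f (i + j)) := by
  rw [← List.map_drop, ← List.map_take, List.range_eq_range', List.drop_range']
  simp only [Nat.zero_add, Nat.mul_one]
  rw [List.take_range'_of_length_ge (by omega), List.range'_eq_map_range]
  simp [List.map_map, Function.comp]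

-- ===== VERDICT (by name: the statement is the Claim_ definition above) =====
theorem make_diag_grid_spec : Claim_equal_make_diag_grid := by
  intro size nc _ _
  unfold Spec_make_diag_grid make_diag_grid make_diag_grid_alt
  rcases le_or_gt size 0 with hle | hpos
  · simp [PySem.List.pyRange_one_eq_nil hle]
  · obtain ⟨n, rfl⟩ : ∃ n : Nat, size = (n : Int) := ⟨size.toNat, (Int.toNat_of_nonneg hpos.le).symm⟩
    have hn : 0 < n := by exact_mod_cast hpos
    have h2 : (2 * (n : Int) - 1) = ((2 * n - 1 : Nat) : Int) := by omega
    show (_ : List (List Int) × Int).1 = _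
    rw [outerA_eq]
    simp only [List.nil_append, h2, PySem.List.pyRange_zero_natCast,
      List.map_map, List.length_map, List.length_range]
    apply List.map_congr_left
    intro i hi
    rw [List.mem_range] at hi
    simp only [Function.comp_apply]
    rw [show ((i : Int) + (n : Int)) = ((i : Int) + ((n : Nat) : Int)) from rfl,
      PySem.List.slice_natCast_add]
    rw [window_map_range _ _ _ _ (by omega)]
    apply List.map_congr_left
    intro j hj
    show ((0 : Int) + i + j).fmod nc = ((((i + j : Nat)) : Int)).fmod nc
    congr 1
    push_cast
    ring
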